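-- pv_equiv track=rewrite | github.com/Barnabas19/Algorithms | algorithm.py | find_n_largest
-- ===== SOURCE A (Python) =====
-- def find_n_largest(arr, n):
--     blacklist = []
--     largest = -float('inf')
--     distinct = set()
--
--     for k in arr:
--         distinct.add(k)
--
--     for j in range(len(distinct)):
--         for i in arr:
--             if not(i in blacklist):
--                 largest = max(largest, i)
--
--         blacklist.append(largest)
--         largest = -float('inf')
--
--     return blacklist
-- ===== SOURCE B (Python) =====
-- def find_n_largest(arr, n):
--     # n is ignored, as in the original: return all distinct values, descending.
--     return sorted(set(arr), reverse=True)
-- ===== Notes on version B (the rewrite author's own statement) =====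
-- stated objective: faster
-- what changed: Replaces the d repeated full-array max scans (one per distinct value, each rebuilding the max while skipping a growing blacklist) by a single dedup-into-a-set followed by one reverse sort of the distinct values.
import Mathlib
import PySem

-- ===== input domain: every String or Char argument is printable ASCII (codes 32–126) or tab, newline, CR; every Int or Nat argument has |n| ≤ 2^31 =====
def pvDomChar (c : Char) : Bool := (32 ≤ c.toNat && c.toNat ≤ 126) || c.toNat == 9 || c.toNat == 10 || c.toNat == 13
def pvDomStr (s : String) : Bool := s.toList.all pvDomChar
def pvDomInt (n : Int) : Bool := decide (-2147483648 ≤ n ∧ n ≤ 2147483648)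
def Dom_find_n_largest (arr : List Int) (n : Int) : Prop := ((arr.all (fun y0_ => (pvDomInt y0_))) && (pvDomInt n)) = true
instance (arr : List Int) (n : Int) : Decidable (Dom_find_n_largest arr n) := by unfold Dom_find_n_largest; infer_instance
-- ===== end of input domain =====

-- B replaces A's repeated full-array max scans by dedup-into-a-set then one reverse sort of the distinct values (objective: faster).

-- ===== PORT A =====
-- the inner 'for i in arr' loop; 'largest' starts at -float('inf'), modelled as 'none'
def pvInnerA (arr blacklist : List Int) : Option Int :=
  arr.foldl (fun largest i =>
    if !(blacklist.contains i) then
      some (match largest with | none => i | some l => max l i)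
    else largest) none

def find_n_largest (arr : List Int) (_n : Int) : List Int :=
  let distinct : PySem.Set Int := arr.foldl PySem.Set.add PySem.Set.empty
  (PySem.List.pyRange 0 (distinct.length : Int) 1).foldl
    (fun blacklist _j =>
      match pvInnerA arr blacklist with
      | some largest => blacklist ++ [largest]
      -- 'none' is Python's unreachable 'append -float('inf')' branch: there are exactly
      -- len(distinct) rounds, so some element is always unblacklisted when appending
      | none => blacklist) []

-- ===== PORT B =====
def find_n_largest_alt (arr : List Int) (_n : Int) : List Int :=
  PySem.List.sorted (PySem.Set.ofList arr) (fun x => x) true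

-- ===== PRECONDITION & SPEC =====
def Spec_find_n_largest (arr : List Int) (n : Int) (out : List Int) : Prop := out = find_n_largest_alt arr n
instance (arr : List Int) (n : Int) (out : List Int) : Decidable (Spec_find_n_largest arr n out) := by unfold Spec_find_n_largest; infer_instance

-- ===== CLAIM (what is proved, stated in full; the proofs are below) =====
def Claim_equal_find_n_largest : Prop := ∀ (arr : List Int) (n : Int), Dom_find_n_largest arr n → Spec_find_n_largest arr n (find_n_largest arr n)

-- ===== LEMMAS AND PROOFS =====

-- A's running-max fold over a list is max(list)
lemma foldl_optmax (t : List Int) (x : Int) :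
    t.foldl (fun largest i => some (match largest with | none => i | some l => max l i)) (some x)
      = some (t.foldl max x) := by
  induction t generalizing x with
  | nil => rfl
  | cons y t ih => simpa using ih (max x y)

-- the inner loop is max of the non-blacklisted elements
lemma pvInnerA_eq_max? (arr bl : List Int) :
    pvInnerA arr bl = PySem.List.max? (arr.filter (fun i => !(bl.contains i))) (fun x => x) := by
  unfold pvInnerA
  rw [← List.foldl_filter]
  cases h : arr.filter (fun i => !(bl.contains i)) with
  | nil => simp [PySem.List.max?]
  | cons x t =>
      rw [PySem.List.max?_id_cons]
      exact foldl_optmax t x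

lemma max?_eq_of_bound {l : List Int} {m : Int} (hm : m ∈ l) (hb : ∀ y ∈ l, y ≤ m) :
    PySem.List.max? l (fun x => x) = some m := by
  cases h : PySem.List.max? l (fun x => x) with
  | none =>
      rw [PySem.List.max?_eq_none_iff] at h
      subst h; simp at hm
  | some k =>
      have h1 : m ≤ k := PySem.List.max?_isMax h m hm
      have h2 : k ≤ m := hb k (PySem.List.max?_mem h)
      exact congrArg some (le_antisymm h2 h1)

-- one round of A's outer loop, stated for any strictly-descending enumeration S of arr's values
lemma step_take (arr S : List Int) (hpair : S.Pairwise (· > ·))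
    (hmem : ∀ x : Int, x ∈ S ↔ x ∈ arr) (j : Nat) (hj : j < S.length) :
    pvInnerA arr (S.take j) = some (S[j]) := by
  have hgt : ∀ p q (_ : p < S.length) (_ : q < S.length), p < q → S[p] > S[q] :=
    fun p q hp hq hpq => List.pairwise_iff_getElem.mp hpair p q hp hq hpq
  rw [pvInnerA_eq_max?]
  apply max?_eq_of_bound
  · rw [List.mem_filter]
    refine ⟨(hmem _).mp (S.getElem_mem hj), ?_⟩
    simp only [Bool.not_eq_eq_eq_not, Bool.not_true, List.contains_eq_mem,
      decide_eq_false_iff_not]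
    intro hmemt
    obtain ⟨k, hk, hke⟩ := List.mem_take_iff_getElem.mp hmemt
    have hk' : k < j := lt_of_lt_of_le hk (min_le_left _ _)
    have hkS : k < S.length := lt_of_lt_of_le hk (min_le_right _ _)
    exact absurd hke (ne_of_gt (hgt k j hkS hj hk'))
  · intro y hy
    rw [List.mem_filter] at hy
    obtain ⟨hy1, hy2⟩ := hy
    obtain ⟨k, hk, hke⟩ := List.mem_iff_getElem.mp ((hmem y).mpr hy1)
    by_cases hkj : k < j
    · exfalso
      have : y ∈ S.take j :=
        List.mem_take_iff_getElem.mpr ⟨k, lt_min hkj hk, hke⟩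
      simp [List.contains_eq_mem, this] at hy2
    · rcases Nat.lt_or_ge j k with h | h
      · exact le_of_lt (hke ▸ hgt j k hj hk h)
      · have : k = j := by omega
        subst this
        exact le_of_eq hke.symm

-- A's outer loop extends the blacklist from S.take j to S.take (j + rounds)
lemma outer_loop_take (arr S : List Int) (hpair : S.Pairwise (· > ·))
    (hmem : ∀ x : Int, x ∈ S ↔ x ∈ arr) (l : List Int) (j : Nat)
    (h : j + l.length ≤ S.length) :
    l.foldl (fun blacklist _j =>
        match pvInnerA arr blacklist with
        | some largest => blacklist ++ [largest]
        | none => blacklist) (S.take j)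
      = S.take (j + l.length) := by
  induction l generalizing j with
  | nil => simp
  | cons a t ih =>
      have hj : j < S.length := by simp only [List.length_cons] at h; omega
      simp only [List.foldl_cons, step_take arr S hpair hmem j hj]
      have htake : S.take j ++ [S[j]] = S.take (j + 1) := by
        rw [List.take_add_one, List.getElem?_eq_getElem hj]
        rfl
      rw [htake, ih (j + 1) (by simp only [List.length_cons] at h; omega)]
      congr 1
      simp only [List.length_cons]
      omega

-- B's output is strictly descending
lemma S_pairwise_gt (arr : List Int) :
    (PySem.List.sorted (PySem.Set.ofList arr) (fun x => x) true).Pairwise (· > ·) := by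
  have h1 := PySem.List.sorted_pairwise_rev (PySem.Set.ofList arr) (fun x : Int => x)
  have h2 : (PySem.List.sorted (PySem.Set.ofList arr) (fun x : Int => x) true).Nodup :=
    (PySem.List.sorted_perm (PySem.Set.ofList arr) (fun x : Int => x) true).nodup_iff.mpr
      (PySem.Set.nodup_ofList arr)
  exact (h1.and h2).imp (fun {a b} hab => lt_of_le_of_ne hab.1 (fun he => hab.2 he.symm))

-- B's output lists exactly arr's values
lemma mem_S_iff (arr : List Int) (x : Int) :
    x ∈ PySem.List.sorted (PySem.Set.ofList arr) (fun x => x) true ↔ x ∈ arr := by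
  rw [PySem.List.mem_sorted]
  exact PySem.Set.mem_ofList arr x

-- ===== VERDICT (by name: the statement is the Claim_ definition above) =====
theorem find_n_largest_spec : Claim_equal_find_n_largest := by
  intro arr n _
  unfold Spec_find_n_largest find_n_largest find_n_largest_alt
  have hd : (arr.foldl PySem.Set.add PySem.Set.empty) = PySem.Set.ofList arr :=
    (PySem.Set.ofList_eq_foldl arr).symm
  rw [hd]
  have hlen : (PySem.Set.ofList arr).length
      = (PySem.List.sorted (PySem.Set.ofList arr) (fun x : Int => x) true).length :=
    ((PySem.List.sorted_perm (PySem.Set.ofList arr) (fun x : Int => x) true).length_eq).symm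
  have hr := outer_loop_take arr (PySem.List.sorted (PySem.Set.ofList arr) (fun x => x) true)
    (S_pairwise_gt arr) (mem_S_iff arr)
    (PySem.List.pyRange 0 ((PySem.Set.ofList arr).length : Int) 1) 0
    (by rw [PySem.List.length_pyRange_one]; omega)
  simp only [List.take_zero, Nat.zero_add] at hr
  rw [hr, PySem.List.length_pyRange_one]
  have h2 : (((PySem.Set.ofList arr).length : Int) - 0).toNat
      = (PySem.List.sorted (PySem.Set.ofList arr) (fun x : Int => x) true).length := by omega
  rw [h2, List.take_length]
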